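-- pv_equiv track=rewrite | github.com/RayannonVelarde/Offline-GUI-Topic-Modeling | studio/gui/topic_modeling_page.py | _find_normalized_span
-- ===== SOURCE A (Python) =====
-- def _find_normalized_span(
--
--     display_text: str,
--     excerpt: str,
-- ) -> tuple[int, int] | None:
--     """
--     Find excerpt inside display_text while treating newlines/multiple spaces as normal spaces.
--     Returns character start/end positions in display_text.
--     """
--     target = " ".join(excerpt.split()).lower()
--
--     if not target:
--         return None
--
--     normalized_chars = []
--     index_map = []
--     previous_was_space = False
--
--     for original_index, char in enumerate(display_text):
--         if char.isspace():
--             if not previous_was_space: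
--                 normalized_chars.append(" ")
--                 index_map.append(original_index)
--                 previous_was_space = True
--         else:
--             normalized_chars.append(char.lower())
--             index_map.append(original_index)
--             previous_was_space = False
--
--     normalized_text = "".join(normalized_chars)
--     start_norm = normalized_text.find(target)
--
--     # If the full excerpt does not match, try matching the first chunk.
--     if start_norm == -1 and len(target) > 120:
--         target = target[:120]
--         start_norm = normalized_text.find(target)
--
--     if start_norm == -1:
--         return None
--
--     end_norm = start_norm + len(target) - 1
--
--     if start_norm >= len(index_map) or end_norm >= len(index_map):
--         return None
--
--     start_original = index_map[start_norm]
--     end_original = index_map[end_norm] + 1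
--
--     return start_original, end_original
-- ===== SOURCE B (Python) =====
-- def _find_normalized_span(
--     display_text: str,
--     excerpt: str,
-- ):
--     """Direct scan of display_text (no normalized copy / index map):
--     try a whitespace-run-collapsing match at every run head."""
--     target = " ".join(excerpt.split()).lower()
--     if not target:
--         return None
--     res = _scan(display_text, target)
--     if res is None and len(target) > 120:
--         res = _scan(display_text, target[:120])
--     return res
--
--
-- def _match_at(s, i, t):
--     # Match t (single-space normalized) against s starting at index i (a run head).
--     # Returns (index of first char of the last matched unit) + 1, or None.
--     n = len(s)
--     last = len(t) - 1
--     for j, tc in enumerate(t):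
--         if i >= n:
--             return None
--         c = s[i]
--         if c.isspace():
--             if tc != ' ':
--                 return None
--             if j == last:
--                 return i + 1
--             i += 1
--             while i < n and s[i].isspace():
--                 i += 1
--         else:
--             if c.lower() != tc:
--                 return None
--             if j == last:
--                 return i + 1
--             i += 1
--     return None
--
--
-- def _scan(s, t):
--     prev_space = False
--     i = 0
--     n = len(s)
--     while i < n:
--         if s[i].isspace() and prev_space:
--             i += 1
--             continue
--         e = _match_at(s, i, t)
--         if e is not None:
--             return (i, e)
--         prev_space = s[i].isspace()
--         i += 1
--     return None
-- ===== Notes on version B (the rewrite author's own statement) =====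
-- stated objective: alternative
-- what changed: Instead of materializing a lowercased whitespace-collapsed copy of display_text plus a parallel index_map and running str.find on the copy, B matches the normalized excerpt directly against display_text with a whitespace-run-collapsing matcher tried at each run head, reading spans straight off the original indices.
import Mathlib
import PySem

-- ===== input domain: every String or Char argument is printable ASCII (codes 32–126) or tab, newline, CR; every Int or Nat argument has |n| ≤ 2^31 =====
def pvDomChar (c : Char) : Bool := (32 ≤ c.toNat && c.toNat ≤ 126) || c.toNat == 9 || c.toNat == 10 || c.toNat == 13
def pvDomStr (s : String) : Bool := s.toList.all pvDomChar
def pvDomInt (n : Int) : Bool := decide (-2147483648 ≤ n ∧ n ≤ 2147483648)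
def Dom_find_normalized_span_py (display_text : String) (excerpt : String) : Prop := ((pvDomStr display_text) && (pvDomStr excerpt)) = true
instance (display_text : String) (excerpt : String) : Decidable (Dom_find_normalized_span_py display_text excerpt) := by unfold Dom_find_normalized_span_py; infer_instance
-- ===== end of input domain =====

-- B replaces A's normalized-copy + index-map construction by a direct whitespace-run-collapsing
-- scan of display_text (alternative algorithm, no auxiliary strings built).


-- ===== PORT A =====
-- one loop step of A's normalization pass (appends to normalized_chars / index_map, tracks the flag)
def pvStepA (acc : List Char × List Int × Bool) (p : Int × Char) : List Char × List Int × Bool :=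
  if PySem.Chars.isspace p.2 then
    if !acc.2.2 then (acc.1 ++ [' '], acc.2.1 ++ [p.1], true) else acc
  else (acc.1 ++ [PySem.Chars.lowerChar p.2], acc.2.1 ++ [p.1], false)

def find_normalized_span_py (display_text : String) (excerpt : String) : Option (Int × Int) :=
  let target : List Char := PySem.Chars.lower (PySem.Chars.join [' '] (PySem.Chars.split₀ excerpt.toList))
  if target = [] then none
  else
    let st := (PySem.List.enumerate display_text.toList 0).foldl pvStepA ([], [], false)
    let normalized_text := st.1
    let index_map := st.2.1
    let start_norm0 := PySem.Chars.find normalized_text target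
    -- 'if start_norm == -1 and len(target) > 120: target = target[:120]; start_norm = …'
    let tk : List Char × Int :=
      if start_norm0 = -1 ∧ 120 < target.length then
        let target2 := PySem.List.slice target none (some 120)
        (target2, PySem.Chars.find normalized_text target2)
      else (target, start_norm0)
    if tk.2 = -1 then none
    else
      let end_norm : Int := tk.2 + tk.1.length - 1
      if tk.2 ≥ (index_map.length : Int) ∨ end_norm ≥ (index_map.length : Int) then none
      else some (PySem.List.pyGetD index_map tk.2 0, PySem.List.pyGetD index_map end_norm 0 + 1)

-- ===== PORT B =====
-- _match_at: match the single-space-normalized t against s from run head i;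
-- returns (index of first char of last matched unit) + 1
def pvMatchAt : List Char → Nat → List Char → Option Nat
  | _, _, [] => none
  | [], _, _ :: _ => none
  | c :: rest, i, tc :: t' =>
    if PySem.Chars.isspace c then
      if tc = ' ' then
        if t' = [] then some (i + 1)
        else pvMatchAt (rest.dropWhile PySem.Chars.isspace)
                       (i + 1 + (rest.takeWhile PySem.Chars.isspace).length) t'
      else none
    else
      if PySem.Chars.lowerChar c = tc then
        if t' = [] then some (i + 1) else pvMatchAt rest (i + 1) t'
      else none

-- _scan: try _match_at at every run head, left to right
def pvScan : List Char → Nat → Bool → List Char → Option (Nat × Nat)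
  | [], _, _, _ => none
  | c :: rest, i, prev, t =>
    if PySem.Chars.isspace c && prev then pvScan rest (i + 1) true t
    else
      match pvMatchAt (c :: rest) i t with
      | some e => some (i, e)
      | none => pvScan rest (i + 1) (PySem.Chars.isspace c) t

def find_normalized_span_py_alt (display_text : String) (excerpt : String) : Option (Int × Int) :=
  let target : List Char := PySem.Chars.lower (PySem.Chars.join [' '] (PySem.Chars.split₀ excerpt.toList))
  if target = [] then none
  else
    let res := pvScan display_text.toList 0 false target
    let res2 := match res with
      | some r => some r
      | none =>
        if 120 < target.length then
          pvScan display_text.toList 0 false (PySem.List.slice target none (some 120))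
        else none
    res2.map (fun r => ((r.1 : Int), (r.2 : Int)))

-- ===== PRECONDITION & SPEC =====
def Spec_find_normalized_span_py (display_text : String) (excerpt : String) (out : Option (Int × Int)) : Prop := out = find_normalized_span_py_alt display_text excerpt
instance (display_text : String) (excerpt : String) (out : Option (Int × Int)) : Decidable (Spec_find_normalized_span_py display_text excerpt out) := by unfold Spec_find_normalized_span_py; infer_instance

-- ===== CLAIM (what is proved, stated in full; the proofs are below) =====
def Claim_equal_find_normalized_span_py : Prop := ∀ (display_text : String) (excerpt : String), Dom_find_normalized_span_py display_text excerpt → Spec_find_normalized_span_py display_text excerpt (find_normalized_span_py display_text excerpt)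

-- ===== LEMMAS AND PROOFS =====

-- the normalized text paired with each char's original index
def pnorm : List Char → Nat → Bool → List (Char × Nat)
  | [], _, _ => []
  | c :: rest, i, prev =>
    if PySem.Chars.isspace c then
      if prev then pnorm rest (i+1) true
      else (' ', i) :: pnorm rest (i+1) true
    else (PySem.Chars.lowerChar c, i) :: pnorm rest (i+1) false

def pvEndPrev : List Char → Bool → Bool
  | [], p => p
  | c :: rest, _ => pvEndPrev rest (PySem.Chars.isspace c)

def pvFirst : List (Char × Nat) → List Char → Option (Nat × Nat)
  | [], _ => none
  | u :: P', t =>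
    if t <+: ((u :: P').map Prod.fst)
    then some (u.2, ((u :: P').getD (t.length - 1) (' ', 0)).2 + 1)
    else pvFirst P' t

theorem foldA_eq (s : List Char) : ∀ (i : Nat) (ncs : List Char) (imap : List Int) (prev : Bool),
    (PySem.List.enumerate s (i : Int)).foldl pvStepA (ncs, imap, prev)
      = (ncs ++ (pnorm s i prev).map Prod.fst,
         imap ++ (pnorm s i prev).map (fun q => ((q.2 : Int))),
         pvEndPrev s prev) := by
  induction s with
  | nil => intro i ncs imap prev; simp [pnorm, pvEndPrev, PySem.List.enumerate_nil]
  | cons c rest ih =>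
    intro i ncs imap prev
    rw [PySem.List.enumerate_cons]
    have hcast : (i : Int) + 1 = ((i + 1 : Nat) : Int) := by push_cast; ring
    by_cases h : PySem.Chars.isspace c
    · by_cases hp : prev
      · subst hp
        simp only [List.foldl_cons, pvStepA, h, Bool.not_true, pnorm, pvEndPrev, hcast, ih]
        simp
      · simp only [Bool.not_eq_true] at hp; subst hp
        simp only [List.foldl_cons, pvStepA, h, pnorm, pvEndPrev, hcast]
        simp only [Bool.not_false, ih]
        simp
    · simp only [List.foldl_cons, pvStepA, h, pnorm, pvEndPrev, hcast]
      simp only [ih]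
      simp

theorem pnorm_true (s : List Char) : ∀ i : Nat,
    pnorm s i true
      = pnorm (s.dropWhile PySem.Chars.isspace)
          (i + (s.takeWhile PySem.Chars.isspace).length) false := by
  induction s with
  | nil => intro i; simp [pnorm]
  | cons c rest ih =>
    intro i
    by_cases h : PySem.Chars.isspace c
    · simp only [pnorm, h, ih (i+1)]
      simp [h]
      ring_nf
    · simp [pnorm, h]

theorem matchAt_spec (t : List Char) : ∀ (s : List Char) (i : Nat), t ≠ [] →
    pvMatchAt s i t =
      if t <+: (pnorm s i false).map Prod.fst
      then some (((pnorm s i false).getD (t.length - 1) (' ', 0)).2 + 1)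
      else none := by
  induction t with
  | nil => intro s i ht; exact absurd rfl ht
  | cons tc t' ih =>
    intro s i _
    cases s with
    | nil => simp [pvMatchAt, pnorm]
    | cons c rest =>
      by_cases h : PySem.Chars.isspace c
      · have hpn : pnorm (c :: rest) i false = (' ', i) :: pnorm rest (i+1) true := by
          simp [pnorm, h]
        rw [hpn]
        by_cases htc : tc = ' '
        · subst htc
          cases t' with
          | nil => simp [pvMatchAt, h]
          | cons a u =>
            have hne : (a :: u) ≠ ([] : List Char) := by simp
            rw [show pvMatchAt (c :: rest) i (' ' :: a :: u)
                  = pvMatchAt (rest.dropWhile PySem.Chars.isspace)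
                      (i + 1 + (rest.takeWhile PySem.Chars.isspace).length) (a :: u) by
                simp [pvMatchAt, h]]
            rw [ih _ _ hne, ← pnorm_true rest (i+1)]
            simp only [List.map_cons, List.cons_prefix_cons, true_and]
            by_cases hp : (a :: u) <+: (pnorm rest (i+1) true).map Prod.fst
            · rw [if_pos hp, if_pos hp]
              simp
            · rw [if_neg hp, if_neg hp]
        · have : pvMatchAt (c :: rest) i (tc :: t') = none := by
            simp [pvMatchAt, h, htc]
          rw [this, if_neg]
          simp only [List.map_cons, List.cons_prefix_cons]
          intro hcon
          exact htc hcon.1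
      · have hpn : pnorm (c :: rest) i false
            = (PySem.Chars.lowerChar c, i) :: pnorm rest (i+1) false := by
          simp [pnorm, h]
        rw [hpn]
        by_cases htc : PySem.Chars.lowerChar c = tc
        · subst htc
          cases t' with
          | nil => simp [pvMatchAt, h]
          | cons a u =>
            have hne : (a :: u) ≠ ([] : List Char) := by simp
            rw [show pvMatchAt (c :: rest) i (PySem.Chars.lowerChar c :: a :: u)
                  = pvMatchAt rest (i + 1) (a :: u) by simp [pvMatchAt, h]]
            rw [ih _ _ hne]
            simp only [List.map_cons, List.cons_prefix_cons, true_and]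
            by_cases hp : (a :: u) <+: (pnorm rest (i+1) false).map Prod.fst
            · rw [if_pos hp, if_pos hp]
              simp
            · rw [if_neg hp, if_neg hp]
        · have : pvMatchAt (c :: rest) i (tc :: t') = none := by
            simp [pvMatchAt, h, htc]
          rw [this, if_neg]
          simp only [List.map_cons, List.cons_prefix_cons]
          intro hcon
          exact htc hcon.1.symm

theorem scan_spec (s : List Char) : ∀ (i : Nat) (prev : Bool) (t : List Char), t ≠ [] →
    pvScan s i prev t = pvFirst (pnorm s i prev) t := by
  induction s with
  | nil => intro i prev t ht; simp [pvScan, pnorm, pvFirst]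
  | cons c rest ih =>
    intro i prev t ht
    by_cases h : PySem.Chars.isspace c
    · cases prev with
      | true =>
        rw [show pvScan (c :: rest) i true t = pvScan rest (i+1) true t by simp [pvScan, h],
            show pnorm (c :: rest) i true = pnorm rest (i+1) true by simp [pnorm, h]]
        exact ih (i+1) true t ht
      | false =>
        have hpn : pnorm (c :: rest) i false = (' ', i) :: pnorm rest (i+1) true := by
          simp [pnorm, h]
        rw [show pvScan (c :: rest) i false t
              = (match pvMatchAt (c :: rest) i t with
                 | some e => some (i, e)
                 | none => pvScan rest (i + 1) (PySem.Chars.isspace c) t) by simp [pvScan, h]]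
        rw [matchAt_spec t _ i ht, h, ih (i+1) true t ht, hpn, pvFirst]
        by_cases hp : t <+: ((' ', i) :: pnorm rest (i+1) true).map Prod.fst
        · rw [if_pos hp, if_pos hp]
        · rw [if_neg hp, if_neg hp]
    · rw [Bool.not_eq_true] at h
      have hpn : ∀ p, pnorm (c :: rest) i p
          = (PySem.Chars.lowerChar c, i) :: pnorm rest (i+1) false := by
        intro p; simp [pnorm, h]
    
      rw [show pvScan (c :: rest) i prev t
            = (match pvMatchAt (c :: rest) i t with
               | some e => some (i, e)
               | none => pvScan rest (i + 1) (PySem.Chars.isspace c) t) by simp [pvScan, h]]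
      rw [matchAt_spec t _ i ht, h, ih (i+1) false t ht, hpn prev, hpn false, pvFirst]
      by_cases hp : t <+: ((PySem.Chars.lowerChar c, i) :: pnorm rest (i+1) false).map Prod.fst
      · rw [if_pos hp, if_pos hp]
      · rw [if_neg hp, if_neg hp]

theorem pvFirst_none_iff (t : List Char) (ht : t ≠ []) : ∀ P : List (Char × Nat),
    (pvFirst P t = none ↔ ∀ j, ¬ t <+: (P.map Prod.fst).drop j) := by
  intro P
  induction P with
  | nil =>
    simp only [pvFirst, List.map_nil, List.drop_nil, true_iff]
    intro j hp
    exact ht (List.prefix_nil.mp hp)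
  | cons u P' ih =>
    rw [pvFirst]
    by_cases hp : t <+: ((u :: P').map Prod.fst)
    · rw [if_pos hp]
      constructor
      · intro hcon; exact absurd hcon (by simp)
      · intro hall; exact absurd hp (by simpa using hall 0)
    · rw [if_neg hp, ih]
      constructor
      · intro hall j
        cases j with
        | zero => simpa using hp
        | succ m => simpa [List.map_cons, List.drop_succ_cons] using hall m
      · intro hall m
        simpa [List.map_cons, List.drop_succ_cons] using hall (m+1)

theorem pvFirst_some (t : List Char) (ht : t ≠ []) : ∀ (P : List (Char × Nat)) (a b : Nat),
    pvFirst P t = some (a, b) →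
      ∃ j, t <+: (P.map Prod.fst).drop j ∧ (∀ j' < j, ¬ t <+: (P.map Prod.fst).drop j') ∧
        a = (P.getD j (' ', 0)).2 ∧ b = (P.getD (j + t.length - 1) (' ', 0)).2 + 1 := by
  intro P
  induction P with
  | nil => intro a b hcon; simp [pvFirst] at hcon
  | cons u P' ih =>
    intro a b hab
    rw [pvFirst] at hab
    by_cases hp : t <+: ((u :: P').map Prod.fst)
    · rw [if_pos hp] at hab
      have h2 := Option.some.inj hab
      refine ⟨0, by simpa using hp, by omega, ?_, ?_⟩
      · have : u.2 = a := congrArg Prod.fst h2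
        simp [← this]
      · have := congrArg Prod.snd h2
        simpa using this.symm
    · rw [if_neg hp] at hab
      obtain ⟨j, h1, h2, h3, h4⟩ := ih a b hab
      refine ⟨j + 1, by simpa [List.drop_succ_cons] using h1, ?_, ?_, ?_⟩
      · intro j' hj'
        cases j' with
        | zero => simpa using hp
        | succ m => simpa [List.drop_succ_cons] using h2 m (by omega)
      · simpa [List.getD_cons_succ] using h3
      · have hlen : 1 ≤ t.length := by
          cases t with | nil => exact absurd rfl ht | cons x xs => simp
        have : j + 1 + t.length - 1 = (j + t.length - 1) + 1 := by omega
        rw [this, List.getD_cons_succ]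
        exact h4

theorem core_eq (P : List (Char × Nat)) (t : List Char) (ht : t ≠ []) :
    (let k := PySem.Chars.find (P.map Prod.fst) t
     if k = -1 then none
     else
       let e : Int := k + t.length - 1
       if k ≥ ((P.map (fun q => ((q.2 : Int)))).length : Int) ∨ e ≥ ((P.map (fun q => ((q.2 : Int)))).length : Int) then none
       else some (PySem.List.pyGetD (P.map (fun q => ((q.2 : Int)))) k 0,
                  PySem.List.pyGetD (P.map (fun q => ((q.2 : Int)))) e 0 + 1))
    = (pvFirst P t).map (fun r => ((r.1 : Int), (r.2 : Int))) := by
  have htl : 1 ≤ t.length := by cases t with | nil => exact absurd rfl ht | cons x xs => simp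
  set norm := P.map Prod.fst with hnorm
  set k := PySem.Chars.find norm t with hk
  by_cases hneg : k = -1
  · -- no occurrence: both sides none
    have hno : ¬ t <:+: norm := (PySem.Chars.find_eq_neg_one_iff norm t).mp hneg
    have hnone : pvFirst P t = none := by
      rw [pvFirst_none_iff t ht P]
      intro j hp
      exact hno (List.IsInfix.trans hp.isInfix (List.drop_suffix j norm).isInfix)
    simp [hneg, hnone]
  · have hk0 : 0 ≤ k := by
      have := PySem.Chars.neg_one_le_find norm t
      omega
    obtain ⟨hpref, hmin⟩ := PySem.Chars.find_spec (s := norm) (sub := t) hk0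
    rw [← hk] at hpref hmin
    have hlen : k.toNat + t.length ≤ P.length := by
      have h1 := hpref.length_le
      have h2 : (norm.drop k.toNat).length = norm.length - k.toNat := by simp
      have h3 : norm.length = P.length := by simp [hnorm]
      have h4 : k ≤ (norm.length : Int) := PySem.Chars.find_le_length norm t
      omega
    -- pvFirst returns some, at exactly j = k.toNat
    cases hfst : pvFirst P t with
    | none =>
      exfalso
      exact ((pvFirst_none_iff t ht P).mp hfst) k.toNat hpref
    | some r =>
      obtain ⟨a, b⟩ := r
      obtain ⟨j, hj1, hj2, hj3, hj4⟩ := pvFirst_some t ht P a b hfst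
      have hjk : j = k.toNat := by
        rcases Nat.lt_trichotomy j k.toNat with h | h | h
        · exact absurd hj1 (hmin j h)
        · exact h
        · exact absurd hpref (hj2 k.toNat h)
      subst hjk
      have hlenmap : (P.map (fun q => ((q.2 : Int)))).length = P.length := by simp
      have hck : ¬ (k ≥ ((P.map (fun q => ((q.2 : Int)))).length : Int) ∨
          k + (t.length : Int) - 1 ≥ ((P.map (fun q => ((q.2 : Int)))).length : Int)) := by
        rw [hlenmap]
        rintro (h | h) <;> omega
      rw [if_neg hneg]
      rw [if_neg hck]
      have hklt : k < ((P.map (fun q => ((q.2 : Int)))).length : Int) := by rw [hlenmap]; omega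
      have helt : k + (t.length : Int) - 1 < ((P.map (fun q => ((q.2 : Int)))).length : Int) := by
        rw [hlenmap]; omega
      rw [PySem.List.pyGetD_eq_getElem _ 0 hk0 hklt,
          PySem.List.pyGetD_eq_getElem _ 0 (by omega) helt]
      have het : (k + (t.length : Int) - 1).toNat = k.toNat + t.length - 1 := by omega
      have hjlt : k.toNat < P.length := by omega
      have hjlt2 : k.toNat + t.length - 1 < P.length := by omega
      simp only [het, List.getElem_map]
      simp only [Option.map_some]
      rw [hj3, hj4]
      simp [hjlt, hjlt2]

theorem portA_core (d e : String) : find_normalized_span_py d e =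
    (let t : List Char := PySem.Chars.lower (PySem.Chars.join [' '] (PySem.Chars.split₀ e.toList))
     if t = [] then none
     else
       let P := pnorm d.toList 0 false
       let imap := P.map (fun q => ((q.2 : Int)))
       let core : List Char → Option (Int × Int) := fun u =>
         let k := PySem.Chars.find (P.map Prod.fst) u
         if k = -1 then none
         else
           let ee : Int := k + u.length - 1
           if k ≥ (imap.length : Int) ∨ ee ≥ (imap.length : Int) then none
           else some (PySem.List.pyGetD imap k 0, PySem.List.pyGetD imap ee 0 + 1)
       if PySem.Chars.find (P.map Prod.fst) t = -1 ∧ 120 < t.length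
       then core (t.take 120)
       else core t) := by
  unfold find_normalized_span_py
  have hfold : (PySem.List.enumerate d.toList 0).foldl pvStepA ([], [], false)
      = ((pnorm d.toList 0 false).map Prod.fst,
         (pnorm d.toList 0 false).map (fun q => ((q.2 : Int))),
         pvEndPrev d.toList false) := by
    have := foldA_eq d.toList 0 [] [] false
    simpa using this
  rw [hfold]
  simp only []
  set t : List Char := PySem.Chars.lower (PySem.Chars.join [' '] (PySem.Chars.split₀ e.toList)) with htdef
  by_cases ht : t = []
  · simp [ht]
  · rw [if_neg ht, if_neg ht]
    set P := pnorm d.toList 0 false with hP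
    have hslice : PySem.List.slice t none (some 120) = t.take 120 := by
      simpa using PySem.List.slice_to t (b := 120) (by norm_num)
    by_cases hc : PySem.Chars.find (P.map Prod.fst) t = -1 ∧ 120 < t.length
    · rw [if_pos hc, if_pos hc, hslice]
    · rw [if_neg hc, if_neg hc]

theorem portB_core (d e : String) : find_normalized_span_py_alt d e =
    (let t : List Char := PySem.Chars.lower (PySem.Chars.join [' '] (PySem.Chars.split₀ e.toList))
     if t = [] then none
     else
       let P := pnorm d.toList 0 false
       if pvFirst P t = none ∧ 120 < t.length
       then (pvFirst P (t.take 120)).map (fun r => ((r.1 : Int), (r.2 : Int)))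
       else (pvFirst P t).map (fun r => ((r.1 : Int), (r.2 : Int)))) := by
  unfold find_normalized_span_py_alt
  simp only []
  set t : List Char := PySem.Chars.lower (PySem.Chars.join [' '] (PySem.Chars.split₀ e.toList)) with htdef
  by_cases ht : t = []
  · simp [ht]
  · rw [if_neg ht, if_neg ht]
    set P := pnorm d.toList 0 false with hP
    have hslice : PySem.List.slice t none (some 120) = t.take 120 := by
      simpa using PySem.List.slice_to t (b := 120) (by norm_num)
    have htk : t.take 120 ≠ [] := by
      simp [List.take_eq_nil_iff, ht]
    rw [scan_spec d.toList 0 false t ht, hslice]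
    cases hn : pvFirst P t with
    | none =>
      by_cases hl : 120 < t.length
      · have hcond : ((none : Option (Nat × Nat)) = none ∧ 120 < t.length) := ⟨rfl, hl⟩
        rw [if_pos hcond, if_pos hl, scan_spec d.toList 0 false (t.take 120) htk]
      · rw [if_neg hl, if_neg (fun hcon : _ ∧ _ => hl hcon.2)]
    | some r =>
      rw [if_neg (show ¬((some r : Option (Nat × Nat)) = none ∧ 120 < t.length) by simp)]

-- ===== VERDICT (by name: the statement is the Claim_ definition above) =====
theorem find_normalized_span_py_spec : Claim_equal_find_normalized_span_py := by
  intro d e _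
  unfold Spec_find_normalized_span_py
  rw [portA_core, portB_core]
  simp only []
  set t : List Char := PySem.Chars.lower (PySem.Chars.join [' '] (PySem.Chars.split₀ e.toList)) with htdef
  by_cases ht : t = []
  · rw [if_pos ht, if_pos ht]
  · rw [if_neg ht, if_neg ht]
    set P := pnorm d.toList 0 false with hP
    have htk : t.take 120 ≠ [] := by simp [List.take_eq_nil_iff, ht]
    have hiff : pvFirst P t = none ↔ PySem.Chars.find (P.map Prod.fst) t = -1 := by
      rw [pvFirst_none_iff t ht P, PySem.Chars.find_eq_neg_one_iff]
      constructor
      · intro hall hinf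
        obtain ⟨j, hj⟩ := (PySem.Chars.exists_prefix_drop_iff_isIn (sub := t) (s := P.map Prod.fst)).mpr
          ((PySem.Chars.isIn_iff_infix t (P.map Prod.fst)).mpr hinf)
        exact hall j hj
      · intro hno j hp
        exact hno (List.IsInfix.trans hp.isInfix (List.drop_suffix j (P.map Prod.fst)).isInfix)
    by_cases hc : PySem.Chars.find (P.map Prod.fst) t = -1 ∧ 120 < t.length
    · rw [if_pos hc, if_pos (show pvFirst P t = none ∧ 120 < t.length from ⟨hiff.mpr hc.1, hc.2⟩)]
      exact core_eq P (t.take 120) htk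
    · rw [if_neg hc, if_neg (show ¬(pvFirst P t = none ∧ 120 < t.length) from
          fun hcon => hc ⟨hiff.mp hcon.1, hcon.2⟩)]
      exact core_eq P t ht
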